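-- pv_equiv track=rewrite | github.com/kgfilho/iaed_pisa2018 | etapa07_descoberta_modelos.py | _encontrar_nomes_reais
-- ===== SOURCE A (Python) =====
-- def _encontrar_nomes_reais(colunas_df: list, codigos_prefixo: list) -> list:
--     nomes_encontrados = []
--     colunas_df_lower = {col.lower(): col for col in colunas_df}
--     for codigo in codigos_prefixo:
--         codigo_lower = codigo.lower()
--         matches = [col for col_lower, col in colunas_df_lower.items() if col_lower.startswith(codigo_lower)]
--         if matches:
--             nomes_encontrados.append(matches[0])
--     return nomes_encontrados
-- ===== SOURCE B (Python) =====
-- def _encontrar_nomes_reais(colunas_df: list, codigos_prefixo: list) -> list: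
--     # Single pass over the (lowercased) columns, assigning each still-unmatched
--     # prefix its first matching column, instead of re-scanning all columns per prefix.
--     colunas_df_lower = {col.lower(): col for col in colunas_df}
--     encontrados = {}
--     for col_lower, col in colunas_df_lower.items():
--         for codigo in codigos_prefixo:
--             if codigo not in encontrados and col_lower.startswith(codigo.lower()):
--                 encontrados[codigo] = col
--     return [encontrados[c] for c in codigos_prefixo if c in encontrados]
-- ===== Notes on version B (the rewrite author's own statement) =====
-- stated objective: alternative
-- what changed: B inverts the loop nest: instead of re-scanning all columns for each prefix code, it makes one pass over the lowercased columns, assigning each still-unmatched prefix its first matching column in a dict, then emits results in prefix order.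
import Mathlib
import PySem

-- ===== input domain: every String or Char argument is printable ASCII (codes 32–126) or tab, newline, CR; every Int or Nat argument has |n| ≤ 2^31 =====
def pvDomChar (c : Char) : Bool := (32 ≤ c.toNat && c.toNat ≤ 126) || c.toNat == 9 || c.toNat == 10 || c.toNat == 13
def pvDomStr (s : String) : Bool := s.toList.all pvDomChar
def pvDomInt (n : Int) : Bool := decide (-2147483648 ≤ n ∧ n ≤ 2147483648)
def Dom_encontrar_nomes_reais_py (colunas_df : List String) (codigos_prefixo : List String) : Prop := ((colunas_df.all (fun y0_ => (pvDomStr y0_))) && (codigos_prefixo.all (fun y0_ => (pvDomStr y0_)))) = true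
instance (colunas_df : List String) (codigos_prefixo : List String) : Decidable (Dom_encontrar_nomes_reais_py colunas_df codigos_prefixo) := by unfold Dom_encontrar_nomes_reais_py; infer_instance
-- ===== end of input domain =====

-- B replaces A's per-prefix rescans of the columns by one pass over the lowercased
-- columns that assigns each still-unmatched prefix its first match (objective: alternative).

-- ===== PORT A =====
def encontrar_nomes_reais_py (colunas_df : List String) (codigos_prefixo : List String) : List String :=
  let colunas_df_lower : PySem.Dict String String :=
    colunas_df.foldl (fun d col => d.insert (PySem.Str.lower col) col) PySem.Dict.empty
  codigos_prefixo.foldl (fun nomes_encontrados codigo =>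
    let codigo_lower := PySem.Str.lower codigo
    let matched := (colunas_df_lower.items.filter
        (fun p => PySem.Str.startswith p.1 codigo_lower)).map (fun p => p.2)
    match matched with
    | [] => nomes_encontrados
    | m :: _ => nomes_encontrados ++ [m]) []

-- ===== PORT B =====
def encontrar_nomes_reais_py_alt (colunas_df : List String) (codigos_prefixo : List String) : List String :=
  let colunas_df_lower : PySem.Dict String String :=
    colunas_df.foldl (fun d col => d.insert (PySem.Str.lower col) col) PySem.Dict.empty
  let encontrados : PySem.Dict String String :=
    colunas_df_lower.items.foldl (fun enc p =>
      codigos_prefixo.foldl (fun enc codigo =>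
        if !enc.contains codigo && PySem.Str.startswith p.1 (PySem.Str.lower codigo) then
          enc.insert codigo p.2
        else enc) enc) PySem.Dict.empty
  codigos_prefixo.filterMap (fun c => encontrados.get? c)

-- ===== PRECONDITION & SPEC =====
def Spec_encontrar_nomes_reais_py (colunas_df : List String) (codigos_prefixo : List String) (out : List String) : Prop := out = encontrar_nomes_reais_py_alt colunas_df codigos_prefixo
instance (colunas_df : List String) (codigos_prefixo : List String) (out : List String) : Decidable (Spec_encontrar_nomes_reais_py colunas_df codigos_prefixo out) := by unfold Spec_encontrar_nomes_reais_py; infer_instance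

-- ===== CLAIM (what is proved, stated in full; the proofs are below) =====
def Claim_equal_encontrar_nomes_reais_py : Prop := ∀ (colunas_df : List String) (codigos_prefixo : List String), Dom_encontrar_nomes_reais_py colunas_df codigos_prefixo → Spec_encontrar_nomes_reais_py colunas_df codigos_prefixo (encontrar_nomes_reais_py colunas_df codigos_prefixo)

-- ===== LEMMAS AND PROOFS =====

-- A's loop (append first element of each nonempty match list) as a filterMap of head?.
theorem pv_foldl_head (l : List String) (h : String → List String) (acc : List String) :
    l.foldl (fun acc c => match h c with | [] => acc | m :: _ => acc ++ [m]) acc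
      = acc ++ l.filterMap (fun c => (h c).head?) := by
  induction l generalizing acc with
  | nil => simp
  | cons c t ih =>
      cases hc : h c with
      | nil => simp [List.foldl_cons, hc, ih]
      | cons m ms => simp [List.foldl_cons, hc, ih]

theorem pv_head_filter {α : Type} (f : α → Bool) (l : List α) :
    (l.filter f).head? = l.find? f := by
  induction l with
  | nil => rfl
  | cons x t ih => by_cases hx : f x = true <;> simp [hx, ih]

-- B's inner loop (over the prefixes, for one column) described by lookups.
theorem pv_inner (prefs : List String) (p : String × String)
    (enc : PySem.Dict String String) (k : String) :
    (prefs.foldl (fun enc codigo =>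
        if !enc.contains codigo && PySem.Str.startswith p.1 (PySem.Str.lower codigo) then
          enc.insert codigo p.2
        else enc) enc).get? k
      = if k ∈ prefs ∧ enc.get? k = none ∧ PySem.Str.startswith p.1 (PySem.Str.lower k)
        then some p.2 else enc.get? k := by
  induction prefs generalizing enc with
  | nil => simp
  | cons c t ih =>
      simp only [List.foldl_cons]
      by_cases hg : (!enc.contains c && PySem.Str.startswith p.1 (PySem.Str.lower c)) = true
      · rw [if_pos hg, ih]
        simp only [Bool.and_eq_true, Bool.not_eq_true'] at hg
        have hnone : enc.get? c = none := by
          have h2 := PySem.Dict.contains_eq_isSome_get? enc c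
          rw [hg.1] at h2
          exact Option.not_isSome_iff_eq_none.mp (by simp [← h2])
        simp only [PySem.Dict.get?_insert]
        by_cases hk : k = c
        · subst hk
          rw [if_pos rfl, if_neg (by simp), if_pos ⟨by simp, hnone, hg.2⟩]
        · simp [List.mem_cons, hk]
      · rw [if_neg hg, ih]
        simp only [Bool.and_eq_true, Bool.not_eq_true'] at hg
        by_cases hk : k = c
        · subst hk
          have hC : ¬ (enc.get? k = none ∧ PySem.Str.startswith p.1 (PySem.Str.lower k) = true) := by
            intro hc2
            apply hg
            refine ⟨?_, hc2.2⟩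
            have h2 := PySem.Dict.contains_eq_isSome_get? enc k
            rw [hc2.1] at h2
            simpa using h2
          rw [if_neg (by tauto), if_neg (by tauto)]
        · simp [List.mem_cons, hk]

-- B's outer loop: the dict's lookup at a prefix in the list is the first matching pair.
theorem pv_outer (prefs : List String) (L : List (String × String))
    (enc : PySem.Dict String String) (k : String) (hk : k ∈ prefs) :
    (L.foldl (fun enc p =>
        prefs.foldl (fun enc codigo =>
          if !enc.contains codigo && PySem.Str.startswith p.1 (PySem.Str.lower codigo) then
            enc.insert codigo p.2
          else enc) enc) enc).get? k
      = (enc.get? k).or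
          ((L.find? (fun p => PySem.Str.startswith p.1 (PySem.Str.lower k))).map (fun p => p.2)) := by
  induction L generalizing enc with
  | nil => cases h : enc.get? k <;> simp [h]
  | cons p t ih =>
      simp only [List.foldl_cons]
      rw [ih, pv_inner prefs p enc k]
      by_cases hs : PySem.Str.startswith p.1 (PySem.Str.lower k) = true
      · rw [List.find?_cons_of_pos (by exact hs)]
        cases h : enc.get? k with
        | some v => rw [if_neg (by simp), Option.some_or, Option.some_or]
        | none =>
            rw [if_pos ⟨hk, rfl, hs⟩, Option.some_or, Option.none_or]
            rfl
      · rw [List.find?_cons_of_neg (by simpa using hs), if_neg (by tauto)]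

-- Both programs, with the shared lowercased-column items abstracted as L.
theorem pv_main (L : List (String × String)) (prefs : List String) :
    prefs.foldl (fun nomes codigo =>
      match (L.filter (fun p => PySem.Str.startswith p.1 (PySem.Str.lower codigo))).map (fun p => p.2) with
      | [] => nomes
      | m :: _ => nomes ++ [m]) []
    = prefs.filterMap (fun c =>
        (L.foldl (fun enc p =>
          prefs.foldl (fun enc codigo =>
            if !enc.contains codigo && PySem.Str.startswith p.1 (PySem.Str.lower codigo) then
              enc.insert codigo p.2
            else enc) enc) PySem.Dict.empty).get? c) := by
  rw [pv_foldl_head prefs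
    (fun codigo => (L.filter (fun p => PySem.Str.startswith p.1 (PySem.Str.lower codigo))).map (fun p => p.2))]
  simp only [List.nil_append]
  apply List.filterMap_congr
  intro c hc
  rw [List.head?_map, pv_head_filter, pv_outer prefs L PySem.Dict.empty c hc]
  simp [PySem.Dict.get?_empty]

-- ===== VERDICT (by name: the statement is the Claim_ definition above) =====
theorem encontrar_nomes_reais_py_spec : Claim_equal_encontrar_nomes_reais_py := by
  intro colunas_df codigos_prefixo _
  unfold Spec_encontrar_nomes_reais_py encontrar_nomes_reais_py encontrar_nomes_reais_py_alt
  exact pv_main _ codigos_prefixo
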